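-- pv_equiv track=rewrite | github.com/half-dreamer/ICS-lab6 | assist_func.py | search_for_deci_num
-- ===== SOURCE A (Python) =====
-- def search_for_deci_num(instruction):
--             """
--     return the  decimal number in the instruction
--     the decimal number in the instruction starts with "#"
--             """
--             num_prefix = instruction.find('#')
--             instruction = instruction[(num_prefix+1):]
--             instruction = instruction.rstrip()
--             num = 0
--             is_minus = False
--             if instruction[0] =='-':
--                 is_minus = True
--                 instruction = instruction[1:]
--             for digit in instruction:
--                 num = num *10 +int(digit)
--             if is_minus:
--                 num = -num
--             return num
-- ===== SOURCE B (Python) =====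
-- def search_for_deci_num(instruction):
--     tail = instruction[instruction.find('#') + 1:].rstrip()
--     sign = -1 if tail[0] == '-' else 1
--     digits = [int(d) for d in (tail[1:] if sign < 0 else tail)]
--     return sign * sum(d * 10 ** i for i, d in enumerate(reversed(digits)))
-- ===== Notes on version B (the rewrite author's own statement) =====
-- stated objective: alternative
-- what changed: Replaces A's single left-to-right Horner loop (num = num*10 + int(digit) with a mutable sign flag) with a staged pipeline: first convert the whole digit substring to a list of ints, then compute the value as a sum of place values d*10^i over enumerate(reversed(digits)), multiplied by a sign factor.
import Mathlib
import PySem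

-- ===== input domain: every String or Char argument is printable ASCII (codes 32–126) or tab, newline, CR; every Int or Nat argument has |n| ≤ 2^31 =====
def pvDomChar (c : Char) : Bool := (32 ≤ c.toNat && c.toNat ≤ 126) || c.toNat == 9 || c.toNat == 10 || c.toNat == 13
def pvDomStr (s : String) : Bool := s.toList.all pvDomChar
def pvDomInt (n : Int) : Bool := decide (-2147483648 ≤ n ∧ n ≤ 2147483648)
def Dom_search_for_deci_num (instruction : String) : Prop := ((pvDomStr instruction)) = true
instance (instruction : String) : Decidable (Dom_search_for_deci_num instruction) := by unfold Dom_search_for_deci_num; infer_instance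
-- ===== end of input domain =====

-- B replaces A's single left-to-right Horner loop with a staged pipeline: convert the digit
-- substring to a list of ints first, then sum place values d*10^i over enumerate(reversed(digits)).

-- ===== PORT A =====
-- num_prefix = instruction.find('#'); instruction = instruction[(num_prefix+1):]; instruction = instruction.rstrip()
def pvAfterHash (instruction : String) : List Char :=
  PySem.Chars.rstrip (PySem.List.slice instruction.toList
    (some (PySem.Chars.find instruction.toList ['#'] + 1)) none)

def search_for_deci_num (instruction : String) : Int :=
  match PySem.List.pyGet? (pvAfterHash instruction) 0 with
  | none => 0      -- Python raises IndexError here (excluded by Pre_)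
  | some c0 =>
    -- instruction[1:] on a nonempty string = tail
    match (if c0 = '-' then (pvAfterHash instruction).tail else pvAfterHash instruction).foldl
        (fun acc d => acc.bind fun n => (PySem.Int.ofChars? [d]).map fun v => n * 10 + v)
        (some (0 : Int)) with
    | none => 0    -- Python raises ValueError from int(digit) here (excluded by Pre_)
    | some n => if c0 = '-' then -n else n

-- ===== PORT B =====
def search_for_deci_num_alt (instruction : String) : Int :=
  let tail := PySem.Chars.rstrip (PySem.List.slice instruction.toList
    (some (PySem.Chars.find instruction.toList ['#'] + 1)) none)
  match tail with
  | [] => 0        -- tail[0] raises IndexError (excluded by Pre_)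
  | c :: _ =>
    let sign : Int := if c = '-' then -1 else 1
    -- digits = [int(d) for d in (tail[1:] if sign < 0 else tail)]
    match (if sign < 0 then tail.tail else tail).mapM (fun d => PySem.Int.ofChars? [d]) with
    | none => 0    -- int(d) raises ValueError (excluded by Pre_)
    | some ds => sign * (ds.reverse.zipIdx.map (fun p => p.1 * 10 ^ p.2)).sum

-- ===== PRECONDITION & SPEC =====
-- Pre_ excludes exactly the inputs on which A raises: IndexError when nothing is left after the
-- '#' once trailing whitespace is stripped, and ValueError when a remaining character (after an
-- optional leading '-') is not accepted by int().
def Pre_search_for_deci_num (instruction : String) : Prop :=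
  pvAfterHash instruction ≠ [] ∧
    ((if (pvAfterHash instruction).head? = some '-' then (pvAfterHash instruction).tail
      else pvAfterHash instruction).all (fun c => (PySem.Int.ofChars? [c]).isSome)) = true
instance (instruction : String) : Decidable (Pre_search_for_deci_num instruction) := by
  unfold Pre_search_for_deci_num; infer_instance

def pvWitness_search_for_deci_num : String := "#-12"

def Spec_search_for_deci_num (instruction : String) (out : Int) : Prop := out = search_for_deci_num_alt instruction
instance (instruction : String) (out : Int) : Decidable (Spec_search_for_deci_num instruction out) := by unfold Spec_search_for_deci_num; infer_instance

-- ===== CLAIM (what is proved, stated in full; the proofs are below) =====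
def Claim_equal_search_for_deci_num : Prop := ∀ (instruction : String), Dom_search_for_deci_num instruction → Pre_search_for_deci_num instruction → Spec_search_for_deci_num instruction (search_for_deci_num instruction)

-- ===== LEMMAS AND PROOFS =====

-- A's option-threaded Horner fold returns `some` of the pure Horner fold when every char parses.
lemma optA_fold (ds : List Char) (h : ∀ c ∈ ds, (PySem.Int.ofChars? [c]).isSome = true) :
    ∀ a : Int, ds.foldl (fun acc d => acc.bind fun n => (PySem.Int.ofChars? [d]).map fun v => n * 10 + v) (some a)
      = some (ds.foldl (fun n d => n * 10 + (PySem.Int.ofChars? [d]).getD 0) a) := by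
  induction ds with
  | nil => intro a; rfl
  | cons d ds ih =>
    intro a
    obtain ⟨v, hv⟩ := Option.isSome_iff_exists.mp (h d (List.mem_cons_self))
    simp only [List.foldl_cons, Option.bind_some, hv, Option.map_some, Option.getD_some]
    exact ih (fun c hc => h c (List.mem_cons_of_mem _ hc)) _

-- B's comprehension `[int(d) for d in cs]` returns `some` of the value list when every char parses.
lemma mapM_digits (cs : List Char) (h : ∀ c ∈ cs, (PySem.Int.ofChars? [c]).isSome = true) :
    cs.mapM (fun d => PySem.Int.ofChars? [d])
      = some (cs.map (fun d => (PySem.Int.ofChars? [d]).getD 0)) := by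
  induction cs with
  | nil => rfl
  | cons d cs ih =>
    obtain ⟨v, hv⟩ := Option.isSome_iff_exists.mp (h d (List.mem_cons_self))
    simp [List.mapM_cons, hv, ih (fun c hc => h c (List.mem_cons_of_mem _ hc))]

lemma horner_shift (vs : List Int) :
    ∀ a : Int, vs.foldl (fun n v => n * 10 + v) a = a * 10 ^ vs.length + vs.foldl (fun n v => n * 10 + v) 0 := by
  induction vs with
  | nil => intro a; simp
  | cons v vs ih =>
    intro a
    simp only [List.foldl_cons, List.length_cons]
    rw [ih (a * 10 + v), ih (0 * 10 + v)]
    ring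

-- B's sum of place values over enumerate(reversed(vs)) is the Horner value of vs.
lemma sum_place_value (vs : List Int) :
    (vs.reverse.zipIdx.map (fun p => p.1 * 10 ^ p.2)).sum
      = vs.foldl (fun n v => n * 10 + v) 0 := by
  induction vs with
  | nil => rfl
  | cons v vs ih =>
    simp only [List.reverse_cons, List.zipIdx_append, List.map_append, List.sum_append, ih,
      List.foldl_cons, List.length_reverse, List.zipIdx_cons, List.map_cons, List.map_nil,
      List.sum_cons, List.sum_nil, List.zipIdx_nil]
    rw [horner_shift vs (0 * 10 + v)]
    ring

lemma main_equal (instruction : String) (hpre : Pre_search_for_deci_num instruction) :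
    search_for_deci_num instruction = search_for_deci_num_alt instruction := by
  obtain ⟨hne, hall⟩ := hpre
  obtain ⟨c0, rest, hcons⟩ := List.exists_cons_of_ne_nil hne
  rw [List.all_eq_true] at hall
  have hdig := hall
  unfold search_for_deci_num search_for_deci_num_alt
  rw [show PySem.Chars.rstrip (PySem.List.slice instruction.toList
      (some (PySem.Chars.find instruction.toList ['#'] + 1)) none) = pvAfterHash instruction from rfl]
  rw [hcons] at hdig ⊢
  have hget : PySem.List.pyGet? (c0 :: rest) 0 = some c0 := by
    simp [PySem.List.pyGet?, PySem.List.pyIdx?]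
  rw [hget]
  simp only [List.head?_cons, List.tail_cons] at hdig ⊢
  by_cases hm : c0 = '-'
  · simp only [hm, show ((-1 : Int) < 0) = True from by simp, if_pos trivial] at hdig ⊢
    rw [optA_fold rest hdig 0, mapM_digits rest hdig]
    dsimp only
    rw [sum_place_value, List.foldl_map]
    ring
  · simp only [Option.some.injEq, if_neg hm] at hdig ⊢
    rw [show (if (1 : Int) < 0 then rest else c0 :: rest) = c0 :: rest from by norm_num,
      optA_fold (c0 :: rest) hdig 0, mapM_digits (c0 :: rest) hdig]
    dsimp only
    rw [sum_place_value, List.foldl_map]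
    ring

-- ===== VERDICT (by name: the statement is the Claim_ definition above) =====
theorem search_for_deci_num_spec : Claim_equal_search_for_deci_num := by
  intro instruction _ hpre
  unfold Spec_search_for_deci_num
  exact main_equal instruction hpre
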